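-- pv_equiv track=rewrite | github.com/psy1088/Algorithm | Baekjoon/4659.py | check
-- ===== SOURCE A (Python) =====
-- def check(line):
--     vowel = ['a', 'e', 'i', 'o', 'u']
--     v_cnt = 0
--
--     if line[0] in vowel:
--         al = 'v' # v(모음) / c(자음)
--         v_cnt += 1
--     else:
--         al = 'c'
--
--     cnt = 1
--     prev = line[0]
--
--     for i in range(1, len(line)):
--         if line[i] == prev: # 같은 글자가 연속 두번이면 안됨
--             if line[i] != 'e' and line[i] != 'o':
--                 return False
--         prev = line[i]
--
--         if line[i] in vowel:
--             now = 'v'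
--             v_cnt += 1 # 모음 개수 체크
--         else:
--             now = 'c'
--
--         if al == now:
--             cnt += 1
--         else:
--             cnt = 1
--             al = now
--         if cnt == 3: # 모음 or 자음이 연속 3개이면 안됨
--             return False
--
--     if v_cnt == 0: # 모음은 반드시 하나를 포함해야함
--         return False
--     return True
-- ===== SOURCE B (Python) =====
-- def check(line):
--     vowels = set('aeiou')
--     types = [c in vowels for c in line]
--     if not any(types):
--         return False
--     if any(a == b == c for a, b, c in zip(types, types[1:], types[2:])):
--         return False
--     if any(x == y and x not in 'eo' for x, y in zip(line, line[1:])):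
--         return False
--     return True
-- ===== Notes on version B (the rewrite author's own statement) =====
-- stated objective: idiomatic
-- what changed: Replaces A's single stateful scan (run-length counter, previous-type/char state, early returns) by three independent declarative passes over the string: a vowel existence test, a zip-of-three triple-run test on the vowel/consonant type list, and a zip-of-two doubled-letter test.
import Mathlib
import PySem

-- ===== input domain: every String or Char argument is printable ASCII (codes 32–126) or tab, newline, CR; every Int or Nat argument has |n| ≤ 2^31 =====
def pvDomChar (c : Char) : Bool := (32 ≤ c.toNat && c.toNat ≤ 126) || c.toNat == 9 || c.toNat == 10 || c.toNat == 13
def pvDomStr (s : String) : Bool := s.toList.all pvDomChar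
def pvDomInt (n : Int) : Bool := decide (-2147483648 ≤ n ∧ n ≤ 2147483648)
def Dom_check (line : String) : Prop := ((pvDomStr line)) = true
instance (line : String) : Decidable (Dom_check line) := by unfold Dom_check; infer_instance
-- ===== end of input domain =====

-- B replaces A's single stateful scan by three independent declarative passes (vowel
-- existence, triple-run of same type, doubled letter); return values agree on every
-- nonempty string (A raises IndexError on "", where B returns False).

-- ===== PORT A =====
-- vowel = ['a','e','i','o','u']; 'line[i] in vowel'
def pvVowelsA : List Char := ['a', 'e', 'i', 'o', 'u']

-- the for-loop over range(1, len(line)); state (al, v_cnt, cnt, prev)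
def checkLoop : List Char → Char → Int → Int → Char → Bool
  | [], _, v_cnt, _, _ => !(v_cnt == 0)
  | c :: rest, al, v_cnt, cnt, prev =>
    if c == prev && !(c == 'e') && !(c == 'o') then false
    else
      let prev' := c
      let now : Char := if pvVowelsA.contains c then 'v' else 'c'
      let v_cnt' := if pvVowelsA.contains c then v_cnt + 1 else v_cnt
      let cnt' := if al == now then cnt + 1 else 1
      let al' := if al == now then al else now
      if cnt' == 3 then false else checkLoop rest al' v_cnt' cnt' prev'

def check (line : String) : Bool :=
  match line.toList with
  | [] => false   -- Python raises IndexError on line[0]; excluded by Pre_check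
  | c :: rest =>
    let al : Char := if pvVowelsA.contains c then 'v' else 'c'
    let v_cnt : Int := if pvVowelsA.contains c then 1 else 0
    checkLoop rest al v_cnt 1 c

-- ===== PORT B =====
-- vowels = set('aeiou'); 'c in vowels'
def pvVowelsB : PySem.Set Char := PySem.Set.ofList ['a', 'e', 'i', 'o', 'u']

def check_alt (line : String) : Bool :=
  let cs := line.toList
  let types := cs.map (fun c => PySem.Set.contains pvVowelsB c)
  if !(types.any id) then false
  else if (types.zip ((types.drop 1).zip (types.drop 2))).any
            (fun t => t.1 == t.2.1 && t.2.1 == t.2.2) then false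
  -- 'x not in 'eo'' on the single char x = x ≠ 'e' and x ≠ 'o'
  else if (cs.zip (cs.drop 1)).any
            (fun p => p.1 == p.2 && !(p.1 == 'e' || p.1 == 'o')) then false
  else true

-- ===== PRECONDITION & SPEC =====
-- A evaluates line[0] first, so it raises IndexError on the empty string: excluded.
def Pre_check (line : String) : Prop := line ≠ ""
instance (line : String) : Decidable (Pre_check line) := by unfold Pre_check; infer_instance
def pvWitness_check : String := "ab"

def Spec_check (line : String) (out : Bool) : Prop := out = check_alt line
instance (line : String) (out : Bool) : Decidable (Spec_check line out) := by unfold Spec_check; infer_instance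

-- ===== CLAIM (what is proved, stated in full; the proofs are below) =====
def Claim_equal_check : Prop := ∀ (line : String), Dom_check line → Pre_check line → Spec_check line (check line)

-- ===== LEMMAS AND PROOFS =====

-- recursive characterisations of B's three zip-passes
def noDbl : List Char → Bool
  | x :: y :: t => !(y == x && !(y == 'e') && !(y == 'o')) && noDbl (y :: t)
  | _ => true

def noTri : Nat → Bool → List Bool → Bool
  | _, _, [] => true
  | k, t, b :: bs => if b == t then (if k == 2 then false else noTri (k + 1) t bs) else noTri 1 b bs

def f3 (l : List Bool) : Bool :=
  (l.zip ((l.drop 1).zip (l.drop 2))).any (fun t => t.1 == t.2.1 && t.2.1 == t.2.2)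

def f2 (l : List Char) : Bool :=
  (l.zip (l.drop 1)).any (fun p => p.1 == p.2 && !(p.1 == 'e' || p.1 == 'o'))

lemma vowelsB_eq (c : Char) : PySem.Set.contains pvVowelsB c = pvVowelsA.contains c := by
  have h : pvVowelsB = pvVowelsA := by decide
  rw [h]
  simp [PySem.Set.contains, pvVowelsA]

lemma f3_cons3 (a b c : Bool) (t : List Bool) :
    f3 (a :: b :: c :: t) = ((a == b && b == c) || f3 (b :: c :: t)) := by
  simp [f3]

lemma f2_cons2 (x y : Char) (t : List Char) :
    f2 (x :: y :: t) = ((x == y && !(x == 'e' || x == 'o')) || f2 (y :: t)) := by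
  simp [f2]

lemma noDbl_eq_f2 : ∀ l : List Char, noDbl l = !f2 l := by
  intro l
  match l with
  | [] => simp [noDbl, f2]
  | [x] => simp [noDbl, f2]
  | x :: y :: t =>
    rw [noDbl, f2_cons2, noDbl_eq_f2 (y :: t)]
    by_cases h : x = y
    · subst h; by_cases he : x = 'e' <;> by_cases ho : x = 'o' <;> simp [he, ho]
    · have h1 : (x == y) = false := by simp [h]
      have h2 : (y == x) = false := by simp [Ne.symm h]
      simp [h1, h2]

lemma noTri_spec : ∀ (bs : List Bool) (t : Bool),
    (noTri 1 t bs = !f3 (t :: bs)) ∧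
    (noTri 2 t bs = ((match bs with | [] => true | b :: _ => !(b == t)) && !f3 (t :: bs))) := by
  intro bs
  induction bs with
  | nil => intro t; cases t <;> constructor <;> decide
  | cons b bs' ih =>
    intro t
    cases bs' with
    | nil => cases t <;> cases b <;> constructor <;> decide
    | cons c t' =>
      have ih1 := (ih t).1
      have ih2 := (ih t).2
      have ihb1 := (ih b).1
      constructor
      · rw [noTri, f3_cons3]
        by_cases h : b = t
        · subst h
          simp only [beq_self_eq_true, if_true]
          rw [(ih b).2]
          cases b <;> cases c <;> simp [f3_cons3]
        · have h1 : (b == t) = false := by simp [h]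
          have h2 : (t == b) = false := by simp [Ne.symm h]
          rw [ihb1]; simp [h1, h2]
      · rw [noTri, f3_cons3]
        by_cases h : b = t
        · subst h; simp
        · have h1 : (b == t) = false := by simp [h]
          have h2 : (t == b) = false := by simp [Ne.symm h]
          rw [ihb1]; simp [h1, h2]

-- main invariant of A's loop: al = type of prev, cnt ∈ {1,2}, v_cnt ≥ 0
lemma loop_eq : ∀ (cs : List Char) (prev : Char) (v cnt : Int), 0 ≤ v → (cnt = 1 ∨ cnt = 2) →
    checkLoop cs (if pvVowelsA.contains prev then 'v' else 'c') v cnt prev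
      = (noDbl (prev :: cs)
          && noTri cnt.toNat (pvVowelsA.contains prev) (cs.map (fun c => pvVowelsA.contains c))
          && !(v == 0 && !(cs.any (fun c => pvVowelsA.contains c)))) := by
  intro cs
  induction cs with
  | nil =>
    intro prev v cnt hv hcnt
    simp only [checkLoop, noDbl, noTri, List.map_nil, List.any_nil]
    rcases hcnt with h | h <;> subst h <;> simp
  | cons c rest ih =>
    intro prev v cnt hv hcnt
    rw [checkLoop]
    by_cases hd : (c == prev && !(c == 'e') && !(c == 'o')) = true
    · rw [if_pos hd]
      have hndf : noDbl (prev :: c :: rest) = false := by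
        rw [noDbl]; simp only [hd]; simp
      simp [hndf]
    · rw [if_neg hd]
      have hnd : noDbl (prev :: c :: rest) = noDbl (c :: rest) := by
        rw [noDbl]
        have : (c == prev && !(c == 'e') && !(c == 'o')) = false := by
          revert hd; cases (c == prev && !(c == 'e') && !(c == 'o')) <;> simp
        simp [this]
      have hv1 : ∀ w : Int, 0 ≤ w → ((w + 1 : Int) == 0) = false := by
        intro w hw; simp only [beq_eq_false_iff_ne, ne_eq]; omega
      cases hc : pvVowelsA.contains c <;> cases hp : pvVowelsA.contains prev
      · -- consonant, consonant: same type
        simp only [hc, hp, Bool.false_eq_true, if_false, beq_self_eq_true, if_true]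
        rcases hcnt with h1 | h2
        · subst h1
          rw [show ((1 : Int) + 1 == 3) = false from rfl, if_neg (by simp),
            show (1 : Int) + 1 = 2 from rfl]
          have H := ih c v 2 hv (Or.inr rfl)
          simp only [hc, Bool.false_eq_true, if_false] at H
          rw [H, hnd]
          simp only [List.map_cons, List.any_cons, hc, hp]
          rw [noTri]
          simp
        · subst h2
          rw [show ((2 : Int) + 1 == 3) = true from rfl, if_pos rfl]
          simp only [List.map_cons, hc, hp]
          rw [noTri]
          simp
      · -- consonant after vowel: type change
        simp only [hc, hp, Bool.false_eq_true, if_false, if_true,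
          show (('v':Char) == 'c') = false from rfl]
        rw [show ((1 : Int) == 3) = false from rfl, if_neg (by simp)]
        have H := ih c v 1 hv (Or.inl rfl)
        simp only [hc, Bool.false_eq_true, if_false] at H
        rw [H, hnd]
        simp only [List.map_cons, List.any_cons, hc, hp]
        rw [noTri]
        simp
      · -- vowel after consonant: type change
        simp only [hc, hp, Bool.false_eq_true, if_false, if_true,
          show (('c':Char) == 'v') = false from rfl]
        rw [show ((1 : Int) == 3) = false from rfl, if_neg (by simp)]
        have H := ih c (v + 1) 1 (by omega) (Or.inl rfl)
        simp only [hc, if_true] at H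
        rw [H, hnd]
        simp only [List.map_cons, List.any_cons, hc, hp]
        rw [noTri]
        simp [hv1 v hv]
      · -- vowel, vowel: same type
        simp only [hc, hp, if_true, beq_self_eq_true]
        rcases hcnt with h1 | h2
        · subst h1
          rw [show ((1 : Int) + 1 == 3) = false from rfl, if_neg (by simp),
            show (1 : Int) + 1 = 2 from rfl]
          have H := ih c (v + 1) 2 (by omega) (Or.inr rfl)
          simp only [hc, if_true] at H
          rw [H, hnd]
          simp only [List.map_cons, List.any_cons, hc, hp]
          rw [noTri]
          simp [hv1 v hv]
        · subst h2
          rw [show ((2 : Int) + 1 == 3) = true from rfl, if_pos rfl]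
          simp only [List.map_cons, hc, hp]
          rw [noTri]
          simp

lemma check_alt_eq (line : String) (c : Char) (rest : List Char)
    (h : line.toList = c :: rest) :
    check_alt line
      = ((c :: rest).any (fun x => pvVowelsA.contains x)
          && noTri 1 (pvVowelsA.contains c) (rest.map (fun x => pvVowelsA.contains x))
          && noDbl (c :: rest)) := by
  have h1 := (noTri_spec (rest.map (fun x => pvVowelsA.contains x)) (pvVowelsA.contains c)).1
  have h2 := noDbl_eq_f2 (c :: rest)
  rw [check_alt]
  simp only [h]
  have hmap : (c :: rest).map (fun x => PySem.Set.contains pvVowelsB x)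
      = (c :: rest).map (fun x => pvVowelsA.contains x) :=
    List.map_congr_left (fun x _ => vowelsB_eq x)
  rw [hmap]
  show (if !((c :: rest).map (fun x => pvVowelsA.contains x)).any id then false
        else if f3 ((c :: rest).map (fun x => pvVowelsA.contains x)) then false
        else if f2 (c :: rest) then false else true) = _
  have hany : ((c :: rest).map (fun x => pvVowelsA.contains x)).any id
      = (c :: rest).any (fun x => pvVowelsA.contains x) := by
    simp [List.any_map]
  rw [hany, show ((c :: rest).map (fun x => pvVowelsA.contains x))
      = pvVowelsA.contains c :: rest.map (fun x => pvVowelsA.contains x) from rfl]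
  rw [h1, h2]
  cases ha : (c :: rest).any (fun x => pvVowelsA.contains x) <;>
    cases h3 : f3 (pvVowelsA.contains c :: rest.map (fun x => pvVowelsA.contains x)) <;>
    cases h4 : f2 (c :: rest) <;>
    simp only [ha, h3, h4, Bool.not_true, Bool.not_false, Bool.false_eq_true, Bool.true_and,
      Bool.and_true, Bool.and_false, Bool.false_and, if_true, if_false] <;> simp

-- ===== VERDICT (by name: the statement is the Claim_ definition above) =====
theorem check_spec : Claim_equal_check := by
  intro line _ hpre
  unfold Spec_check
  cases hcs : line.toList with
  | nil =>
    exact absurd (String.toList_inj.mp hcs) hpre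
  | cons c rest =>
    rw [check]
    simp only [hcs]
    rw [check_alt_eq line c rest hcs]
    rw [loop_eq rest c (if pvVowelsA.contains c then 1 else 0) 1
        (by split_ifs <;> omega) (Or.inl rfl)]
    have hv : (!((if pvVowelsA.contains c then (1 : Int) else 0) == 0
          && !(rest.any fun x => pvVowelsA.contains x)))
        = (c :: rest).any (fun x => pvVowelsA.contains x) := by
      cases hc : pvVowelsA.contains c <;>
        simp only [List.any_cons, hc, Bool.false_eq_true, if_false, if_true] <;> simp
    rw [hv, show Int.toNat 1 = 1 from rfl]
    cases hdb : noDbl (c :: rest) <;>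
      cases htr : noTri 1 (pvVowelsA.contains c) (rest.map fun x => pvVowelsA.contains x) <;>
      cases hvv : (c :: rest).any (fun x => pvVowelsA.contains x) <;> simp
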